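-- pv_equiv track=rewrite | github.com/sophiethompson212/2026-Superquantum-VQI | problem qasms/problem qasms/QiskitProblem10.py | parse_gridsynth_output
-- ===== SOURCE A (Python) =====
-- def parse_gridsynth_output(output):
--     """
--     Parse GridSynth output to get gate sequence
--     Output is usually like: "THSTHTSTHT" or similar
--     """
--     gates = []
--
--     # GridSynth outputs a string of gates
--     i = 0
--     output = output.upper().strip()
--
--     # Remove any non-gate characters
--     gate_str = ''.join(c for c in output if c in 'HTSXYZW*')
--
--     i = 0
--     while i < len(gate_str):
--         if i < len(gate_str) - 1 and gate_str[i:i+2] == 'T*':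
--             gates.append('tdg')
--             i += 2
--         elif i < len(gate_str) - 1 and gate_str[i:i+2] == 'S*':
--             gates.append('sdg')
--             i += 2
--         elif gate_str[i] == 'H':
--             gates.append('h')
--             i += 1
--         elif gate_str[i] == 'T':
--             gates.append('t')
--             i += 1
--         elif gate_str[i] == 'S':
--             gates.append('s')
--             i += 1
--         elif gate_str[i] in ['X', 'Y', 'Z']:
--             gates.append(gate_str[i].lower())
--             i += 1
--         else:
--             i += 1
--
--     return gates
-- ===== SOURCE B (Python) =====
-- SINGLE = {'H': 'h', 'T': 't', 'S': 's', 'X': 'x', 'Y': 'y', 'Z': 'z'}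
--
--
-- def parse_gridsynth_output(output):
--     """One-pass state machine: sweep the characters once keeping one pending
--     character; a '*' completes a pending T/S into tdg/sdg, any other gate
--     character flushes the pending one through SINGLE (W and stray '*' flush
--     to nothing) and becomes the new pending character."""
--     gates = []
--     pending = None
--     for c in output.upper().strip():
--         if c not in 'HTSXYZW*':
--             continue
--         if c == '*' and pending in ('T', 'S'):
--             gates.append('tdg' if pending == 'T' else 'sdg')
--             pending = None
--         else:
--             if pending in SINGLE:
--                 gates.append(SINGLE[pending])
--             pending = c
--     if pending in SINGLE:
--         gates.append(SINGLE[pending])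
--     return gates
-- ===== Notes on version B (the rewrite author's own statement) =====
-- stated objective: alternative
-- what changed: Replaces A's staged pipeline (filter into gate_str, then an index-based while loop with two-character lookahead slicing) by a single left-to-right fold over the raw characters that keeps one pending character of state: a '*' completes a pending T/S into tdg/sdg, any other gate character flushes the pending one through a table; no intermediate string, no indices, no slicing.
import Mathlib
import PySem

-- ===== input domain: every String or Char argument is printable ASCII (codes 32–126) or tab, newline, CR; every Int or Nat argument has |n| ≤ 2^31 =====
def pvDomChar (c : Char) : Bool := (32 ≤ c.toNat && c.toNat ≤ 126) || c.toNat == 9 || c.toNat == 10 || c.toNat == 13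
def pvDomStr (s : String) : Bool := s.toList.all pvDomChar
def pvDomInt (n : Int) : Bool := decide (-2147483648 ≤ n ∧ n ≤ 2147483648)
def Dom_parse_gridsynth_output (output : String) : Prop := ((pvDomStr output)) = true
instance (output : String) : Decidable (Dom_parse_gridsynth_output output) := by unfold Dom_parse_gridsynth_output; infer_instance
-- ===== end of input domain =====

-- B replaces A's filter-then-index-lookahead scan by a single fold with one pending character of state (objective: alternative).

-- ===== PORT A =====
-- A's while loop; `gates` is the accumulated list A appends to.
-- gate_str[i:i+2] is ported as (g.drop i).take 2 — exact for a nonnegative index;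
-- gate_str[i] is g.getD i ' ', exact since the loop guard gives i < g.length.
def pvA_loop (g : List Char) (i : Nat) (gates : List String) : List String :=
  if i < g.length then
    if i < g.length - 1 ∧ (g.drop i).take 2 = ['T', '*'] then
      pvA_loop g (i + 2) (gates ++ ["tdg"])
    else if i < g.length - 1 ∧ (g.drop i).take 2 = ['S', '*'] then
      pvA_loop g (i + 2) (gates ++ ["sdg"])
    else if g.getD i ' ' = 'H' then pvA_loop g (i + 1) (gates ++ ["h"])
    else if g.getD i ' ' = 'T' then pvA_loop g (i + 1) (gates ++ ["t"])
    else if g.getD i ' ' = 'S' then pvA_loop g (i + 1) (gates ++ ["s"])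
    else if g.getD i ' ' ∈ ['X', 'Y', 'Z'] then
      pvA_loop g (i + 1) (gates ++ [String.ofList (PySem.Chars.lower [g.getD i ' '])])
    else pvA_loop g (i + 1) gates
  else gates
termination_by g.length - i
decreasing_by all_goals omega

-- `c in 'HTSXYZW*'` for a single character c is ported as list membership (exact).
def parse_gridsynth_output (output : String) : List String :=
  let gate_str :=
    (PySem.Chars.strip (PySem.Chars.upper output.toList)).filter
      (fun c => c ∈ ['H', 'T', 'S', 'X', 'Y', 'Z', 'W', '*'])
  pvA_loop gate_str 0 []

-- ===== PORT B =====
-- the SINGLE table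
def pvSingle : PySem.Dict Char String :=
  PySem.Dict.ofList [('H', "h"), ('T', "t"), ('S', "s"), ('X', "x"), ('Y', "y"), ('Z', "z")]

-- Source B's repeated `if pending in SINGLE: gates.append(SINGLE[pending])` step
def pvFlush (p : Option Char) : List String :=
  match p with
  | some c => match pvSingle.get? c with | some s => [s] | none => []
  | none => []

-- one iteration of Source B's for-loop over state (gates, pending); `continue` = identity
def pvB_step (st : List String × Option Char) (c : Char) : List String × Option Char :=
  if c ∈ ['H', 'T', 'S', 'X', 'Y', 'Z', 'W', '*'] then
    if c = '*' ∧ (st.2 = some 'T' ∨ st.2 = some 'S') then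
      (st.1 ++ [if st.2 = some 'T' then "tdg" else "sdg"], none)
    else (st.1 ++ pvFlush st.2, some c)
  else st

def parse_gridsynth_output_alt (output : String) : List String :=
  let st := (PySem.Chars.strip (PySem.Chars.upper output.toList)).foldl pvB_step ([], none)
  st.1 ++ pvFlush st.2

-- ===== PRECONDITION & SPEC =====
def Spec_parse_gridsynth_output (output : String) (out : List String) : Prop := out = parse_gridsynth_output_alt output
instance (output : String) (out : List String) : Decidable (Spec_parse_gridsynth_output output out) := by unfold Spec_parse_gridsynth_output; infer_instance

-- ===== CLAIM (what is proved, stated in full; the proofs are below) =====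
def Claim_equal_parse_gridsynth_output : Prop := ∀ (output : String), Dom_parse_gridsynth_output output → Spec_parse_gridsynth_output output (parse_gridsynth_output output)

-- ===== LEMMAS AND PROOFS =====

-- common specification both ports are reduced to
def pvASpec : List Char → List String
  | [] => []
  | [c] => pvFlush (some c)
  | c :: d :: rest =>
    if (c = 'T' ∨ c = 'S') ∧ d = '*' then
      (if c = 'T' then "tdg" else "sdg") :: pvASpec rest
    else pvFlush (some c) ++ pvASpec (d :: rest)
termination_by l => l.length

lemma pvFlush_not (c : Char) (h1 : c ≠ 'H') (h2 : c ≠ 'T') (h3 : c ≠ 'S')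
    (h4 : c ≠ 'X') (h5 : c ≠ 'Y') (h6 : c ≠ 'Z') : pvFlush (some c) = [] := by
  have e1 : ('H' == c) = false := by simp [Ne.symm h1]
  have e2 : ('T' == c) = false := by simp [Ne.symm h2]
  have e3 : ('S' == c) = false := by simp [Ne.symm h3]
  have e4 : ('X' == c) = false := by simp [Ne.symm h4]
  have e5 : ('Y' == c) = false := by simp [Ne.symm h5]
  have e6 : ('Z' == c) = false := by simp [Ne.symm h6]
  have hi : pvSingle.items =
      [('H', "h"), ('T', "t"), ('S', "s"), ('X', "x"), ('Y', "y"), ('Z', "z")] := by rfl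
  simp [pvFlush, PySem.Dict.get?, hi, List.find?, e1, e2, e3, e4, e5, e6]

-- A's elif single-character ladder computes pvFlush
lemma pvLadder (c : Char) :
    (if c = 'H' then ["h"] else if c = 'T' then ["t"] else if c = 'S' then ["s"]
     else if c ∈ ['X', 'Y', 'Z'] then [String.ofList (PySem.Chars.lower [c])] else []) =
    pvFlush (some c) := by
  by_cases h1 : c = 'H'; · subst h1; rfl
  by_cases h2 : c = 'T'; · subst h2; simp [h1]; rfl
  by_cases h3 : c = 'S'; · subst h3; simp [h1, h2]; rfl
  by_cases h4 : c = 'X'; · subst h4; simp [h1, h2, h3]; rfl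
  by_cases h5 : c = 'Y'; · subst h5; simp [h1, h2, h3]; rfl
  by_cases h6 : c = 'Z'; · subst h6; simp [h1, h2, h3]; rfl
  simp [h1, h2, h3, h4, h5, h6, pvFlush_not c h1 h2 h3 h4 h5 h6]

lemma pvA_loop_acc (n : Nat) (g : List Char) (i : Nat) (acc : List String)
    (hn : g.length - i ≤ n) : pvA_loop g i acc = acc ++ pvA_loop g i [] := by
  induction n generalizing i acc with
  | zero =>
      have h : ¬ i < g.length := by omega
      conv_lhs => rw [pvA_loop]
      conv_rhs => rw [pvA_loop]
      simp [h]
  | succ n ih =>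
      by_cases h : i < g.length
      · conv_lhs => rw [pvA_loop]
        conv_rhs => rw [pvA_loop]
        simp only [h, if_true]
        split_ifs with h1 h2 h3 h4 h5 h6 <;>
          (rw [ih _ _ (by omega)]; try (conv_rhs => rw [ih _ _ (by omega)])) <;> simp
      · conv_lhs => rw [pvA_loop]
        conv_rhs => rw [pvA_loop]
        simp [h]

-- A's index loop computes pvASpec of the remaining suffix
lemma pvA_eq (n : Nat) (g : List Char) (i : Nat) (hn : g.length - i ≤ n) :
    pvA_loop g i [] = pvASpec (g.drop i) := by
  induction n generalizing i with
  | zero =>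
      have h : ¬ i < g.length := by omega
      rw [pvA_loop, List.drop_eq_nil_of_le (by omega)]
      simp [h, pvASpec]
  | succ n ih =>
      by_cases h : i < g.length
      · have hd : g.drop i = g[i] :: g.drop (i + 1) := List.drop_eq_getElem_cons h
        by_cases h2 : i + 1 < g.length
        · have hd2 : g.drop (i + 1) = g[i + 1] :: g.drop (i + 2) :=
            List.drop_eq_getElem_cons h2
          have htake : (g.drop i).take 2 = [g[i], g[i + 1]] := by rw [hd, hd2]; rfl
          have hlen : i < g.length - 1 := by omega
          have hget : g.getD i ' ' = g[i] := List.getD_eq_getElem g ' ' h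
          rw [pvA_loop]
          simp only [h, if_true, htake, hget]
          by_cases hT : g[i] = 'T' ∧ g[i + 1] = '*'
          · rw [if_pos ⟨hlen, by simp [hT.1, hT.2]⟩,
                pvA_loop_acc n g (i + 2) _ (by omega), ih (i + 2) (by omega),
                hd, hd2, pvASpec]
            simp [hT.1, hT.2]
          · by_cases hS : g[i] = 'S' ∧ g[i + 1] = '*'
            · have hTn : ¬ (i < g.length - 1 ∧ [g[i], g[i + 1]] = ['T', '*']) := by
                rintro ⟨-, he⟩
                simp at he
                exact hT he
              rw [if_neg hTn,
                  if_pos ⟨hlen, by simp [hS.1, hS.2]⟩,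
                  pvA_loop_acc n g (i + 2) _ (by omega), ih (i + 2) (by omega),
                  hd, hd2, pvASpec]
              simp [hS.1, hS.2]
            · have hnp : ¬ ((g[i] = 'T' ∨ g[i] = 'S') ∧ g[i + 1] = '*') := by
                rintro ⟨hc | hc, hst⟩
                exacts [hT ⟨hc, hst⟩, hS ⟨hc, hst⟩]
              have hTn : ¬ (i < g.length - 1 ∧ [g[i], g[i + 1]] = ['T', '*']) := by
                rintro ⟨-, he⟩
                simp at he
                exact hnp ⟨Or.inl he.1, he.2⟩
              have hSn : ¬ (i < g.length - 1 ∧ [g[i], g[i + 1]] = ['S', '*']) := by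
                rintro ⟨-, he⟩
                simp at he
                exact hnp ⟨Or.inr he.1, he.2⟩
              rw [if_neg hTn, if_neg hSn]
              rw [hd, hd2, pvASpec, if_neg hnp, ← hd2]
              -- single-character ladder
              by_cases c1 : g[i] = 'H'
              · rw [if_pos c1, pvA_loop_acc n g (i + 1) _ (by omega), ih (i + 1) (by omega)]
                rw [c1]; rfl
              by_cases c2 : g[i] = 'T'
              · rw [if_neg c1, if_pos c2, pvA_loop_acc n g (i + 1) _ (by omega),
                    ih (i + 1) (by omega)]
                rw [c2]; rfl
              by_cases c3 : g[i] = 'S'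
              · rw [if_neg c1, if_neg c2, if_pos c3,
                    pvA_loop_acc n g (i + 1) _ (by omega), ih (i + 1) (by omega)]
                rw [c3]; rfl
              by_cases c4 : g[i] ∈ ['X', 'Y', 'Z']
              · rw [if_neg c1, if_neg c2, if_neg c3, if_pos c4,
                    pvA_loop_acc n g (i + 1) _ (by omega), ih (i + 1) (by omega)]
                rcases (by simpa using c4 : g[i] = 'X' ∨ g[i] = 'Y' ∨ g[i] = 'Z') with hc | hc | hc <;>
                  (rw [hc]; rfl)
              · have c5 : g[i] ≠ 'X' ∧ g[i] ≠ 'Y' ∧ g[i] ≠ 'Z' := by simpa using c4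
                rw [if_neg c1, if_neg c2, if_neg c3, if_neg c4, ih (i + 1) (by omega),
                    pvFlush_not g[i] c1 c2 c3 c5.1 c5.2.1 c5.2.2]
                simp
        · -- last character
          have hnil : g.drop (i + 1) = [] := List.drop_eq_nil_of_le (by omega)
          have htake : (g.drop i).take 2 = [g[i]] := by rw [hd, hnil]; rfl
          have hget : g.getD i ' ' = g[i] := List.getD_eq_getElem g ' ' h
          have hA1 : pvA_loop g (i + 1) [] = [] := by
            rw [pvA_loop]; simp [show ¬ i + 1 < g.length from by omega]
          rw [pvA_loop]
          simp only [h, if_true, htake, hget]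
          rw [if_neg (by rintro ⟨hl, -⟩; omega), if_neg (by rintro ⟨hl, -⟩; omega)]
          rw [hd, hnil, pvASpec, ← pvLadder g[i]]
          split_ifs with c1 c2 c3 c4 <;>
            (rw [pvA_loop_acc n g (i + 1) _ (by omega), hA1]; simp)
      · rw [pvA_loop, List.drop_eq_nil_of_le (by omega)]
        simp [h, pvASpec]

-- inner body of pvB_step (the loop body after the `continue` filter)
def pvBi (st : List String × Option Char) (c : Char) : List String × Option Char :=
  if c = '*' ∧ (st.2 = some 'T' ∨ st.2 = some 'S') then
    (st.1 ++ [if st.2 = some 'T' then "tdg" else "sdg"], none)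
  else (st.1 ++ pvFlush st.2, some c)

lemma pvB_step_eq (st : List String × Option Char) (c : Char) :
    pvB_step st c = if c ∈ ['H', 'T', 'S', 'X', 'Y', 'Z', 'W', '*'] then pvBi st c else st := rfl

-- B's fold, with pending p, computes pvASpec of p prepended to the rest
lemma pvB_eq (l : List Char) (acc : List String) (p : Option Char) :
    (l.foldl pvBi (acc, p)).1 ++ pvFlush (l.foldl pvBi (acc, p)).2 =
      acc ++ pvASpec (match p with | none => l | some c => c :: l) := by
  induction l generalizing acc p with
  | nil =>
      cases p with
      | none => simp [pvASpec, pvFlush]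
      | some c => simp [pvASpec]
  | cons d rest ih =>
      rw [List.foldl_cons]
      cases p with
      | none =>
          have hstep : pvBi (acc, none) d = (acc, some d) := by
            simp [pvBi, pvFlush]
          rw [hstep, ih]
      | some c =>
          by_cases hpair : d = '*' ∧ (c = 'T' ∨ c = 'S')
          · have hstep : pvBi (acc, some c) d =
                (acc ++ [if c = 'T' then "tdg" else "sdg"], none) := by
              simp only [pvBi]
              rw [if_pos (by
                rcases hpair.2 with hc | hc <;> simp [hpair.1, hc])]
              rcases hpair.2 with hc | hc <;> simp [hc]
            rw [hstep, ih]
            have hsp : pvASpec (c :: d :: rest) =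
                (if c = 'T' then "tdg" else "sdg") :: pvASpec rest := by
              rw [pvASpec, if_pos ⟨hpair.2, hpair.1⟩]
            rw [hsp]; simp
          · have hstep : pvBi (acc, some c) d = (acc ++ pvFlush (some c), some d) := by
              simp only [pvBi]
              rw [if_neg (by rintro ⟨hd, hc | hc⟩ <;> exact hpair ⟨hd, by simp_all⟩)]
            rw [hstep, ih]
            have hsp : pvASpec (c :: d :: rest) = pvFlush (some c) ++ pvASpec (d :: rest) := by
              rw [pvASpec, if_neg (by rintro ⟨hc, hd⟩; exact hpair ⟨hd, hc⟩)]
            rw [hsp]; simp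

-- ===== VERDICT (by name: the statement is the Claim_ definition above) =====
theorem parse_gridsynth_output_spec : Claim_equal_parse_gridsynth_output := by
  intro output _
  unfold Spec_parse_gridsynth_output parse_gridsynth_output parse_gridsynth_output_alt
  simp only []
  rw [show ∀ st0, (PySem.Chars.strip (PySem.Chars.upper output.toList)).foldl pvB_step st0 =
      ((PySem.Chars.strip (PySem.Chars.upper output.toList)).filter
        (fun c => decide (c ∈ ['H', 'T', 'S', 'X', 'Y', 'Z', 'W', '*']))).foldl pvBi st0
    from fun st0 => by
      rw [List.foldl_filter]
      congr 1
      funext st c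
      rw [pvB_step_eq]
      by_cases hm : c ∈ ['H', 'T', 'S', 'X', 'Y', 'Z', 'W', '*'] <;> simp [hm]]
  rw [pvB_eq, pvA_eq _ _ 0 le_rfl]
  simp
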